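-- pv_equiv track=rewrite | github.com/pavanyellow/F5-TTS | benchmarks/archive/long_audio_rtf_test.py | generate_long_text
-- ===== SOURCE A (Python) =====
-- def generate_long_text(target_length=2000):
--     """
--     Generate a long text that should produce ~2 minutes of audio
--     """
--     # Base story that we'll expand
--     story_segments = [
--         "In the heart of a bustling metropolis, where towering skyscrapers pierce the clouds and millions of people navigate the intricate web of urban life, there exists a hidden world of stories waiting to be told.",
--
--         "Dr. Sarah Chen, a brilliant neuroscientist at the prestigious Metropolitan Research Institute, had dedicated her entire career to understanding the mysteries of human consciousness and the intricate workings of the brain.",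
--
--         "On this particular morning, as golden sunlight filtered through the floor-to-ceiling windows of her laboratory, she made a discovery that would forever change our understanding of memory, perception, and the very nature of human experience.",
--
--         "The breakthrough came unexpectedly, as most revolutionary discoveries do. While analyzing brain scans from patients with rare neurological conditions, she noticed unusual patterns in neural activity that seemed to defy conventional scientific wisdom.",
--
--         "These patterns suggested that the human brain was capable of far more complex processing than previously imagined, operating on multiple levels of consciousness simultaneously, like a symphony orchestra playing several pieces at once.",
--
--         "As she delved deeper into her research, collaborating with colleagues from around the world, the implications became increasingly profound. This wasn't just about neuroscience anymore; it was about understanding the fundamental nature of human experience itself.",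
--
--         "The research team worked tirelessly, conducting experiments that pushed the boundaries of ethical scientific inquiry while maintaining the highest standards of research integrity and human subject protection.",
--
--         "Months turned into years as they refined their techniques, developed new technologies, and gradually built a comprehensive theory that would revolutionize multiple fields of study, from psychology and neuroscience to artificial intelligence and philosophy.",
--
--         "Their findings suggested that consciousness wasn't a single, unified phenomenon, but rather a complex ecosystem of interconnected processes, each contributing to our overall experience of being alive and aware in this remarkable universe.",
--
--         "As the research neared completion, Dr. Chen reflected on the journey that had brought her to this momentous discovery, knowing that the implications would resonate through generations of scientists, philosophers, and anyone seeking to understand the miracle of human consciousness."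
--     ]
--
--     # Combine segments to reach target length
--     full_text = " ".join(story_segments)
--
--     # If we need more text, repeat and extend
--     while len(full_text) < target_length:
--         additional_text = " Furthermore, the implications of this research extend beyond the laboratory, touching on fundamental questions about the nature of reality, perception, and what it means to be human in an increasingly complex world."
--         full_text += additional_text
--
--     # Trim to approximately target length
--     if len(full_text) > target_length:
--         # Find a good sentence ending near the target
--         trim_point = full_text[:target_length].rfind('. ')
--         if trim_point > target_length - 200:  # Within 200 chars of target
--             full_text = full_text[:trim_point + 1]
--
--     return full_text
-- ===== SOURCE B (Python) =====
-- def generate_long_text(target_length=2000):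
--     """
--     Generate a long text that should produce ~2 minutes of audio
--     """
--     story_segments = [
--         "In the heart of a bustling metropolis, where towering skyscrapers pierce the clouds and millions of people navigate the intricate web of urban life, there exists a hidden world of stories waiting to be told.",
--
--         "Dr. Sarah Chen, a brilliant neuroscientist at the prestigious Metropolitan Research Institute, had dedicated her entire career to understanding the mysteries of human consciousness and the intricate workings of the brain.",
--
--         "On this particular morning, as golden sunlight filtered through the floor-to-ceiling windows of her laboratory, she made a discovery that would forever change our understanding of memory, perception, and the very nature of human experience.",
--
--         "The breakthrough came unexpectedly, as most revolutionary discoveries do. While analyzing brain scans from patients with rare neurological conditions, she noticed unusual patterns in neural activity that seemed to defy conventional scientific wisdom.",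
--
--         "These patterns suggested that the human brain was capable of far more complex processing than previously imagined, operating on multiple levels of consciousness simultaneously, like a symphony orchestra playing several pieces at once.",
--
--         "As she delved deeper into her research, collaborating with colleagues from around the world, the implications became increasingly profound. This wasn't just about neuroscience anymore; it was about understanding the fundamental nature of human experience itself.",
--
--         "The research team worked tirelessly, conducting experiments that pushed the boundaries of ethical scientific inquiry while maintaining the highest standards of research integrity and human subject protection.",
--
--         "Months turned into years as they refined their techniques, developed new technologies, and gradually built a comprehensive theory that would revolutionize multiple fields of study, from psychology and neuroscience to artificial intelligence and philosophy.",
--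
--         "Their findings suggested that consciousness wasn't a single, unified phenomenon, but rather a complex ecosystem of interconnected processes, each contributing to our overall experience of being alive and aware in this remarkable universe.",
--
--         "As the research neared completion, Dr. Chen reflected on the journey that had brought her to this momentous discovery, knowing that the implications would resonate through generations of scientists, philosophers, and anyone seeking to understand the miracle of human consciousness."
--     ]
--
--     full_text = " ".join(story_segments)
--
--     # Closed form: append the filler exactly k times, k = smallest count reaching target_length
--     additional_text = " Furthermore, the implications of this research extend beyond the laboratory, touching on fundamental questions about the nature of reality, perception, and what it means to be human in an increasingly complex world."
--     k = max(0, -(-(target_length - len(full_text)) // len(additional_text)))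
--     full_text += additional_text * k
--
--     # Trim to approximately target length
--     if len(full_text) > target_length:
--         trim_point = full_text[:target_length].rfind('. ')
--         if trim_point > target_length - 200:
--             full_text = full_text[:trim_point + 1]
--
--     return full_text
-- ===== Notes on version B (the rewrite author's own statement) =====
-- stated objective: faster
-- what changed: The while-loop that repeatedly appends the filler sentence until the target length is reached is replaced by a closed-form ceiling-division count k and a single string multiplication additional_text * k; the join base and the trailing trim block are unchanged.
import Mathlib
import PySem

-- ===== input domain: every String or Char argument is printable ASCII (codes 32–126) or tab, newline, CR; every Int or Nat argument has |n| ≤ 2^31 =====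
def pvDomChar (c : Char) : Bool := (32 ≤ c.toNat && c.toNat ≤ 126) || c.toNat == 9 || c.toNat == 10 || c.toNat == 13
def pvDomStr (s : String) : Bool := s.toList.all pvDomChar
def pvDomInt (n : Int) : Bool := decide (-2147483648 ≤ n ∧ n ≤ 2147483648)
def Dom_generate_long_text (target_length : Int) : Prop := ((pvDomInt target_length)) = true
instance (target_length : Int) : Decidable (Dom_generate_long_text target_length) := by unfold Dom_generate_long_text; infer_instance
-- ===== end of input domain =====

-- B replaces A's while-append loop by a closed-form repeat count (ceil division); same join base and trim block.
-- ===== PORT A =====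
-- shared literal data: story_segments and the filler sentence, identical in Source A and Source B
def pvSegments : List String := [
  "In the heart of a bustling metropolis, where towering skyscrapers pierce the clouds and millions of people navigate the intricate web of urban life, there exists a hidden world of stories waiting to be told.",
  "Dr. Sarah Chen, a brilliant neuroscientist at the prestigious Metropolitan Research Institute, had dedicated her entire career to understanding the mysteries of human consciousness and the intricate workings of the brain.",
  "On this particular morning, as golden sunlight filtered through the floor-to-ceiling windows of her laboratory, she made a discovery that would forever change our understanding of memory, perception, and the very nature of human experience.",
  "The breakthrough came unexpectedly, as most revolutionary discoveries do. While analyzing brain scans from patients with rare neurological conditions, she noticed unusual patterns in neural activity that seemed to defy conventional scientific wisdom.",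
  "These patterns suggested that the human brain was capable of far more complex processing than previously imagined, operating on multiple levels of consciousness simultaneously, like a symphony orchestra playing several pieces at once.",
  "As she delved deeper into her research, collaborating with colleagues from around the world, the implications became increasingly profound. This wasn't just about neuroscience anymore; it was about understanding the fundamental nature of human experience itself.",
  "The research team worked tirelessly, conducting experiments that pushed the boundaries of ethical scientific inquiry while maintaining the highest standards of research integrity and human subject protection.",
  "Months turned into years as they refined their techniques, developed new technologies, and gradually built a comprehensive theory that would revolutionize multiple fields of study, from psychology and neuroscience to artificial intelligence and philosophy.",
  "Their findings suggested that consciousness wasn't a single, unified phenomenon, but rather a complex ecosystem of interconnected processes, each contributing to our overall experience of being alive and aware in this remarkable universe.",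
  "As the research neared completion, Dr. Chen reflected on the journey that had brought her to this momentous discovery, knowing that the implications would resonate through generations of scientists, philosophers, and anyone seeking to understand the miracle of human consciousness."]

def pvAddChars : List Char := " Furthermore, the implications of this research extend beyond the laboratory, touching on fundamental questions about the nature of reality, perception, and what it means to be human in an increasingly complex world.".toList

-- base = " ".join(story_segments), identical line in both sources
def pvBaseChars : List Char := PySem.Chars.join [' '] (pvSegments.map String.toList)

set_option maxRecDepth 8192 in
theorem pvAddChars_len : pvAddChars.length = 216 := by decide

-- the trim block, identical code in Source A and Source B
def pvTrim (target_length : Int) (full_text : List Char) : List Char :=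
  if (full_text.length : Int) > target_length then
    let trim_point : Int := PySem.Chars.rfind (PySem.List.slice full_text none (some target_length)) ['.', ' ']
    if trim_point > target_length - 200 then PySem.List.slice full_text none (some (trim_point + 1))
    else full_text
  else full_text

-- A's while loop: while len(full_text) < target_length: full_text += additional_text
def pvLoopA (target_length : Int) (full_text : List Char) : List Char :=
  if (full_text.length : Int) < target_length then pvLoopA target_length (full_text ++ pvAddChars)
  else full_text
termination_by (target_length - full_text.length).toNat
decreasing_by simp [pvAddChars_len]; omega

def generate_long_text (target_length : Int) : String :=
  String.ofList (pvTrim target_length (pvLoopA target_length pvBaseChars))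

-- ===== PORT B =====
def generate_long_text_alt (target_length : Int) : String :=
  let full_text := pvBaseChars
  let k : Int := max 0 (-(PySem.Int.floordiv (-(target_length - (full_text.length : Int))) (pvAddChars.length : Int)))
  let full_text := full_text ++ PySem.List.pyRepeat pvAddChars k
  String.ofList (pvTrim target_length full_text)

-- ===== PRECONDITION & SPEC =====
def Spec_generate_long_text (target_length : Int) (out : String) : Prop := out = generate_long_text_alt target_length
instance (target_length : Int) (out : String) : Decidable (Spec_generate_long_text target_length out) := by unfold Spec_generate_long_text; infer_instance

-- ===== CLAIM (what is proved, stated in full; the proofs are below) =====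
def Claim_equal_generate_long_text : Prop := ∀ (target_length : Int), Dom_generate_long_text target_length → Spec_generate_long_text target_length (generate_long_text target_length)

-- ===== LEMMAS AND PROOFS =====
theorem pyRepeat_succ {α : Type} (xs : List α) (k : Int) (hk : 0 ≤ k) :
    PySem.List.pyRepeat xs (k + 1) = xs ++ PySem.List.pyRepeat xs k := by
  simp only [PySem.List.pyRepeat]
  rw [show (k + 1).toNat = k.toNat + 1 by omega, List.replicate_succ, List.flatten_cons]

theorem pvLoopA_eq (t : Int) (s : List Char) :
    pvLoopA t s = s ++ PySem.List.pyRepeat pvAddChars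
      (max 0 (-(PySem.Int.floordiv (-(t - (s.length : Int))) (pvAddChars.length : Int)))) := by
  fun_induction pvLoopA t s with
  | case1 s h ih =>
    rw [ih, List.length_append, pvAddChars_len]
    push_cast
    rw [PySem.Int.floordiv_eq_ediv_of_pos (by norm_num : (0:Int) < 216),
        PySem.Int.floordiv_eq_ediv_of_pos (by norm_num : (0:Int) < 216)]
    rw [show max 0 (-(-(t - ((s.length : Int))) / 216)) =
          (max 0 (-(-(t - ((s.length : Int) + 216)) / 216))) + 1 by omega]
    rw [pyRepeat_succ _ _ (le_max_left _ _), List.append_assoc]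
  | case2 s h =>
    rw [pvAddChars_len]
    push_cast
    rw [PySem.Int.floordiv_eq_ediv_of_pos (by norm_num : (0:Int) < 216)]
    rw [show max 0 (-(-(t - (s.length : Int)) / 216)) = 0 by omega]
    simp [PySem.List.pyRepeat]

-- ===== VERDICT (by name: the statement is the Claim_ definition above) =====
theorem generate_long_text_spec : Claim_equal_generate_long_text := by
  intro t _
  unfold Spec_generate_long_text generate_long_text generate_long_text_alt
  rw [pvLoopA_eq]
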